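-- pv_equiv track=rewrite | github.com/Verbasik/Python-Backend-Development | ascii-doc-validator/app/services/validators/syntax_validator.py | _find_section_for_line
-- ===== SOURCE A (Python) =====
-- from typing import List, Dict, Any, Tuple, Set, Optional
--
-- def _find_section_for_line(content: str, line_num: int) -> Optional[str]:
--     """
--     Description:
--     ---------------
--         Находит раздел, в котором находится указанная строка.
--
--     Args:
--     ---------------
--         content: Содержимое документации.
--         line_num: Номер строки.
--
--     Returns:
--     ---------------
--         Optional[str]: Название раздела или None, если раздел не найден.
--     """
--     lines = content.splitlines()
--     current_section = None
--
--     for i, line in enumerate(lines):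
--         if i + 1 > line_num:
--             break
--
--         if line.startswith("="):
--             # Это заголовок, извлекаем его текст
--             current_section = line.lstrip("= ").strip()
--
--     return current_section
-- ===== SOURCE B (Python) =====
-- def _find_section_for_line(content, line_num):
--     lines = content.splitlines()
--     if line_num < 0:
--         line_num = 0
--     for line in reversed(lines[:line_num]):
--         if line.startswith("="):
--             return line.lstrip("= ").strip()
--     return None
-- ===== Notes on version B (the rewrite author's own statement) =====
-- stated objective: simpler
-- what changed: Replaces A's forward scan with enumerate+break that tracks the last header seen with a single reverse scan of the clamped prefix lines[:max(line_num,0)] that returns the first header found.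
import Mathlib
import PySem

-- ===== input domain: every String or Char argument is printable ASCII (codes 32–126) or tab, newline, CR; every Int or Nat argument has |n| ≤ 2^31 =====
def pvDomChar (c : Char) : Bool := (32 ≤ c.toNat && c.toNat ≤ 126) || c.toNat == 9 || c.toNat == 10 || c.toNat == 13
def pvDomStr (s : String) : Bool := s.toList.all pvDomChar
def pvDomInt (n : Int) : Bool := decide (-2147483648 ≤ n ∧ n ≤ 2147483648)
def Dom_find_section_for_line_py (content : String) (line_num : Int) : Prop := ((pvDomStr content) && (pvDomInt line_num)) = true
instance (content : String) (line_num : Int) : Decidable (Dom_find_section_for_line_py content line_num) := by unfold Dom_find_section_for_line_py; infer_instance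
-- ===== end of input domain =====

-- B replaces A's forward scan with a break (tracking the last header seen) by a reverse scan
-- of the clamped prefix that returns the first header found; objective: simpler.

-- ===== PORT A =====
-- line.lstrip("= ").strip(): the lstrip with an explicit char set is ported by hand
-- (dropWhile over the char list — exact: Python lstrip(chars) drops leading chars in the set).
def pvHeaderText (l : String) : String :=
  PySem.Str.strip (String.ofList (l.toList.dropWhile (fun c => c == '=' || c == ' ')))

-- the for-loop of A: index i, break when i + 1 > line_num, else update current_section
def pvGoA : List String → Nat → Int → Option String → Option String
  | [], _, _, cur => cur
  | l :: ls, i, ln, cur =>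
    if ((i : Int) + 1) > ln then cur
    else pvGoA ls (i + 1) ln
      (if PySem.Str.startswith l "=" then some (pvHeaderText l) else cur)

def find_section_for_line_py (content : String) (line_num : Int) : Option String :=
  pvGoA (PySem.Str.splitlines content) 0 line_num none

-- ===== PORT B =====
-- first header in a (reversed) list of lines
def pvGoB : List String → Option String
  | [] => none
  | l :: ls => if PySem.Str.startswith l "=" then some (pvHeaderText l) else pvGoB ls

def find_section_for_line_py_alt (content : String) (line_num : Int) : Option String :=
  let lines := PySem.Str.splitlines content
  let ln := if line_num < 0 then 0 else line_num
  pvGoB (PySem.List.slice lines none (some ln)).reverse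

-- ===== PRECONDITION & SPEC =====
def Spec_find_section_for_line_py (content : String) (line_num : Int) (out : Option String) : Prop := out = find_section_for_line_py_alt content line_num
instance (content : String) (line_num : Int) (out : Option String) : Decidable (Spec_find_section_for_line_py content line_num out) := by unfold Spec_find_section_for_line_py; infer_instance

-- ===== CLAIM (what is proved, stated in full; the proofs are below) =====
def Claim_equal_find_section_for_line_py : Prop := ∀ (content : String) (line_num : Int), Dom_find_section_for_line_py content line_num → Spec_find_section_for_line_py content line_num (find_section_for_line_py content line_num)

-- ===== LEMMAS AND PROOFS =====

-- forward fold without the break (A's loop body on a pre-truncated list)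
def pvGoF : List String → Option String → Option String
  | [], cur => cur
  | l :: ls, cur => pvGoF ls (if PySem.Str.startswith l "=" then some (pvHeaderText l) else cur)

theorem pvGoA_eq_goF : ∀ (ls : List String) (i : Nat) (ln : Int) (cur : Option String),
    pvGoA ls i ln cur = pvGoF (ls.take (ln - i).toNat) cur := by
  intro ls
  induction ls with
  | nil => intro i ln cur; simp [pvGoA, pvGoF]
  | cons l ls ih =>
    intro i ln cur
    by_cases h : ((i : Int) + 1) > ln
    · have : (ln - i).toNat = 0 := by omega
      simp [pvGoA, h, this, pvGoF]
    · have : (ln - i).toNat = (ln - (i + 1)).toNat + 1 := by omega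
      simp only [pvGoA, if_neg h, this, List.take_succ_cons, pvGoF]
      rw [ih]
      push_cast
      ring_nf

theorem pvGoB_append : ∀ (xs ys : List String),
    pvGoB (xs ++ ys) = match pvGoB xs with | some s => some s | none => pvGoB ys := by
  intro xs ys
  induction xs with
  | nil => simp [pvGoB]
  | cons l xs ih =>
    simp only [List.cons_append, pvGoB]
    split <;> simp [ih]

theorem pvGoF_eq_goB_rev : ∀ (ls : List String) (cur : Option String),
    pvGoF ls cur = match pvGoB ls.reverse with | some s => some s | none => cur := by
  intro ls
  induction ls with
  | nil => intro cur; simp [pvGoF, pvGoB]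
  | cons l ls ih =>
    intro cur
    simp only [pvGoF, List.reverse_cons, pvGoB_append, ih]
    cases pvGoB ls.reverse with
    | some s => rfl
    | none => simp only [pvGoB]; split <;> rfl

-- ===== VERDICT (by name: the statement is the Claim_ definition above) =====
theorem find_section_for_line_py_spec : Claim_equal_find_section_for_line_py := by
  intro content line_num _
  unfold Spec_find_section_for_line_py find_section_for_line_py find_section_for_line_py_alt
  have hln : (if line_num < 0 then (0 : Int) else line_num) = (line_num.toNat : Int) := by omega
  simp only [pvGoA_eq_goF, pvGoF_eq_goB_rev, hln, PySem.List.slice_to_natCast]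
  have h2 : (line_num - ((0 : Nat) : Int)).toNat = line_num.toNat := by omega
  rw [h2]
  cases pvGoB ((PySem.Str.splitlines content).take line_num.toNat).reverse <;> rfl
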